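-- pv_equiv track=rewrite | github.com/VasilyStepanov/libcssom | template/Emitter.py | capitalizeCamelCase
-- ===== SOURCE A (Python) =====
-- def capitalizeCamelCase(ident):
--   assert(' ' not in ident)
--
--   if not ident: return ident
--
--   words = []
--   word = []
--
--
--   pch = ''
--   for ch in ident:
--     if pch.isupper() and ch.islower():
--       words.append(''.join(word))
--       word = [pch]
--     else:
--       word.append(pch)
--
--     pch = ch
--
--   word.append(ch)
--   words.append(''.join(word))
--
--   return "_".join([word.upper() for word in words])
-- ===== SOURCE B (Python) =====
-- def capitalizeCamelCase(ident):
--   # One lookahead pass emitting the result directly: '_' goes before every char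
--   # that is uppercase and followed by a lowercase char (no word buffers, no join of words).
--   assert(' ' not in ident)
--
--   if not ident: return ident
--
--   out = []
--   for c, nxt in zip(ident, ident[1:]):
--     if c.isupper() and nxt.islower():
--       out.append('_')
--     out.append(c.upper())
--   out.append(ident[-1].upper())
--   return ''.join(out)
-- ===== Notes on version B (the rewrite author's own statement) =====
-- stated objective: simpler
-- what changed: B replaces A's lagged-state machine (pch buffer, word char-list, words list, ''.join per word, '_'.join of uppercased words) with a single lookahead pass that emits the uppercased output directly, inserting '_' before each uppercase char followed by a lowercase one.
import Mathlib
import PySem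

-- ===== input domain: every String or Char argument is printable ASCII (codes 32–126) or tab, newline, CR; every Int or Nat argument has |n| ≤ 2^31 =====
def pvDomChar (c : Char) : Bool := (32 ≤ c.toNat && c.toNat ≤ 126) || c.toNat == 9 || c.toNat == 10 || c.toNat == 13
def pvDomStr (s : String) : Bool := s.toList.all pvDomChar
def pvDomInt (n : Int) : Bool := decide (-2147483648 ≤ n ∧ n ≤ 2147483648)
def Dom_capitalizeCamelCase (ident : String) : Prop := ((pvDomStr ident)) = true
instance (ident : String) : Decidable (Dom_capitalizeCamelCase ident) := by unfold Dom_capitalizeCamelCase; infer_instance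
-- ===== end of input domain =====

-- B replaces A's lagged word-buffer state machine by one lookahead pass emitting the result
-- directly; same O(n) cost, simpler code. Equivalence proved on strings without ' ' (A asserts).

-- ===== PORT A =====
-- pch is '' or a one-char string in Python; Option Char here. ''.isupper() = false;
-- appending '' to a char list joined by ''.join is a no-op, so pchChars none = [].
def pchChars : Option Char → List Char
  | none => []
  | some p => [p]

def pchIsUpper : Option Char → Bool
  | none => false
  | some p => PySem.Chars.isupper p

def capAStep (st : List (List Char) × List Char × Option Char) (ch : Char) :
    List (List Char) × List Char × Option Char :=
  match st with
  | (words, word, pch) =>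
    if pchIsUpper pch && PySem.Chars.islower ch then
      (words ++ [word], pchChars pch, some ch)
    else
      (words, word ++ pchChars pch, some ch)

def capitalizeCamelCase (ident : String) : String :=
  if ident = "" then ident
  else
    match ident.toList.foldl capAStep ([], [], none) with
    | (words, word, pch) =>
      -- `word.append(ch)`: after the (nonempty) loop the loop variable ch equals pch
      let word2 := word ++ pchChars pch
      PySem.Str.join "_" (((words ++ [word2]).map String.ofList).map PySem.Str.upper)

-- ===== PORT B =====
-- the zip(ident, ident[1:]) lookahead loop plus the final ident[-1].upper() append,
-- as structural recursion on (current char, rest)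
def capBEmit : Char → List Char → List Char
  | c, [] => [PySem.Chars.upperChar c]
  | c, d :: rest =>
    (if PySem.Chars.isupper c && PySem.Chars.islower d then ['_', PySem.Chars.upperChar c]
     else [PySem.Chars.upperChar c]) ++ capBEmit d rest

def capitalizeCamelCase_alt (ident : String) : String :=
  if ident = "" then ident
  else
    match ident.toList with
    | [] => ident
    | c :: rest => String.ofList (capBEmit c rest)

-- ===== PRECONDITION & SPEC =====
-- Pre_ excludes exactly the strings containing ' ', on which A's `assert` raises AssertionError.
def Pre_capitalizeCamelCase (ident : String) : Prop := ' ' ∉ ident.toList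
instance (ident : String) : Decidable (Pre_capitalizeCamelCase ident) := by unfold Pre_capitalizeCamelCase; infer_instance
def pvWitness_capitalizeCamelCase : String := "fooBarHTMLBaz"

def Spec_capitalizeCamelCase (ident : String) (out : String) : Prop := out = capitalizeCamelCase_alt ident
instance (ident : String) (out : String) : Decidable (Spec_capitalizeCamelCase ident out) := by unfold Spec_capitalizeCamelCase; infer_instance

-- ===== CLAIM (what is proved, stated in full; the proofs are below) =====
def Claim_equal_capitalizeCamelCase : Prop := ∀ (ident : String), Dom_capitalizeCamelCase ident → Pre_capitalizeCamelCase ident → Spec_capitalizeCamelCase ident (capitalizeCamelCase ident)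

-- ===== LEMMAS AND PROOFS =====

-- the word split A's loop computes from state (current word w, previous char c, rest cs)
def capSplit (w : List Char) (c : Char) (cs : List Char) : List (List Char) :=
  match cs with
  | [] => [w ++ [c]]
  | d :: rest =>
    if PySem.Chars.isupper c && PySem.Chars.islower d then w :: capSplit [c] d rest
    else capSplit (w ++ [c]) d rest

def capFinish (st : List (List Char) × List Char × Option Char) : List (List Char) :=
  st.1 ++ [st.2.1 ++ pchChars st.2.2]

theorem capSplit_ne_nil (cs : List Char) : ∀ (w : List Char) (c : Char), capSplit w c cs ≠ [] := by
  induction cs with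
  | nil => intro w c; simp [capSplit]
  | cons d r ih =>
    intro w c
    rw [capSplit]
    split
    · simp
    · exact ih _ _

theorem capA_foldl (cs : List Char) : ∀ (ws : List (List Char)) (w : List Char) (c : Char),
    capFinish (cs.foldl capAStep (ws, w, some c)) = ws ++ capSplit w c cs := by
  induction cs with
  | nil => intro ws w c; simp [capFinish, capSplit, pchChars]
  | cons d rest ih =>
    intro ws w c
    simp only [List.foldl_cons, capAStep, pchIsUpper, capSplit]
    by_cases h : (PySem.Chars.isupper c && PySem.Chars.islower d) = true
    · rw [if_pos h, if_pos h, ih, pchChars]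
      simp
    · rw [if_neg h, if_neg h, ih, pchChars]

theorem capB_join (cs : List Char) : ∀ (w : List Char) (c : Char),
    PySem.Chars.join ['_'] ((capSplit w c cs).map PySem.Chars.upper)
      = PySem.Chars.upper w ++ capBEmit c cs := by
  induction cs with
  | nil =>
    intro w c
    simp [capSplit, capBEmit, PySem.Chars.join_singleton, PySem.Chars.upper]
  | cons d rest ih =>
    intro w c
    by_cases h : (PySem.Chars.isupper c && PySem.Chars.islower d) = true
    · obtain ⟨q, qs, hq⟩ : ∃ q qs, capSplit [c] d rest = q :: qs := by
        cases hsp : capSplit [c] d rest with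
        | nil => exact absurd hsp (capSplit_ne_nil rest [c] d)
        | cons q qs => exact ⟨q, qs, rfl⟩
      have ihc := ih [c] d
      rw [hq] at ihc
      rw [capSplit, if_pos h, List.map_cons, hq, List.map_cons, PySem.Chars.join_cons_cons]
      rw [capBEmit, if_pos h]
      simp only [List.map_cons] at ihc
      simp only [PySem.Chars.upper] at ihc ⊢
      simpa using ihc
    · rw [capSplit, if_neg h, ih, capBEmit, if_neg h]
      simp [PySem.Chars.upper]

theorem cap_core (ident : String) (c : Char) (rest : List Char)
    (h : ident.toList = c :: rest) (hne : ident ≠ "") :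
    capitalizeCamelCase ident = capitalizeCamelCase_alt ident := by
  unfold capitalizeCamelCase capitalizeCamelCase_alt
  rw [if_neg hne, if_neg hne, h]
  have h0 : (c :: rest).foldl capAStep ([], [], none) = rest.foldl capAStep ([], [], some c) := by
    simp [capAStep, pchIsUpper, pchChars]
  rw [h0]
  have hA := capA_foldl rest [] [] c
  have hB := capB_join rest [] c
  cases hst : rest.foldl capAStep ([], [], (some c : Option Char)) with
  | mk words wp =>
    cases wp with
    | mk word pch =>
      rw [hst] at hA
      simp only [capFinish, List.nil_append] at hA
      simp only []
      apply String.toList_inj.mp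
      rw [PySem.Str.toList_join, String.toList_ofList, List.map_map, List.map_map]
      have : (List.map ((String.toList ∘ PySem.Str.upper) ∘ String.ofList) (words ++ [word ++ pchChars pch]))
          = (words ++ [word ++ pchChars pch]).map PySem.Chars.upper := by
        apply List.map_congr_left
        intro a _
        simp [Function.comp, PySem.Str.toList_upper, String.toList_ofList]
      rw [this, hA, hB]
      simp [PySem.Chars.upper]

-- ===== VERDICT (by name: the statement is the Claim_ definition above) =====
theorem capitalizeCamelCase_spec : Claim_equal_capitalizeCamelCase := by
  intro ident _ _
  unfold Spec_capitalizeCamelCase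
  by_cases hne : ident = ""
  · simp [hne, capitalizeCamelCase, capitalizeCamelCase_alt]
  · cases h : ident.toList with
    | nil => exact absurd (String.toList_eq_nil_iff.mp h) hne
    | cons c rest => exact cap_core ident c rest h hne
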